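-- pv_equiv track=rewrite | github.com/prateekgargX/CS747-MDP | A2/encoder.py | middleOf2Points
-- ===== SOURCE A (Python) =====
-- def pos2xy(p):
--     return (p-1)%4+1, (p-1)//4+1
--
-- def xy2pos(x,y):
--     return x+4*(y-1)
--
-- def middleOf2Points(B1,B2):
--     x1,y1 = pos2xy(B1)
--     x2,y2 = pos2xy(B2)
--     points = []
--     if x1==x2:
--         sy = min(y2,y1)
--         ey = max(y2,y1)
--         for y in range(sy,ey+1):
--             points.append(xy2pos(x1,y))
--     elif y1==y2:
--         sx = min(x2,x1)
--         ex = max(x2,x1)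
--         for x in range(sx,ex+1):
--             points.append(xy2pos(x,y1))
--     elif x1 - y1 == x2 - y2:
--         a = x1 - y1
--         sx = min(x2,x1)
--         ex = max(x2,x1)
--         for x in range(sx,ex+1):
--             points.append(xy2pos(x,x-a))
--     elif x1 + y1 == x2 + y2:
--         a = x1 + y1
--         sx = min(x2,x1)
--         ex = max(x2,x1)
--         for x in range(sx,ex+1):
--             points.append(xy2pos(x,a-x))
--     return points
-- ===== SOURCE B (Python) =====
-- def middleOf2Points(B1, B2):
--     x1, y1 = (B1-1) % 4 + 1, (B1-1) // 4 + 1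
--     x2, y2 = (B2-1) % 4 + 1, (B2-1) // 4 + 1
--     if not (x1 == x2 or y1 == y2 or x1 - y1 == x2 - y2 or x1 + y1 == x2 + y2):
--         return []
--     # normalize endpoint order to A's min->max iteration order
--     if (x1 == x2 and y2 < y1) or (x1 != x2 and x2 < x1):
--         x1, y1, x2, y2 = x2, y2, x1, y1
--     dx = (x2 > x1) - (x2 < x1)
--     dy = (y2 > y1) - (y2 < y1)
--     n = max(abs(x2 - x1), abs(y2 - y1))
--     return [(x1 + i*dx) + 4 * ((y1 + i*dy) - 1) for i in range(n + 1)]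
-- ===== Notes on version B (the rewrite author's own statement) =====
-- stated objective: simpler
-- what changed: A's four separate min/max branch loops (vertical, horizontal, diagonal, anti-diagonal) are replaced by one alignment test, an endpoint-order normalization, and a single parametrized march x,y += dx,dy generating the positions in one comprehension.
import Mathlib
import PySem

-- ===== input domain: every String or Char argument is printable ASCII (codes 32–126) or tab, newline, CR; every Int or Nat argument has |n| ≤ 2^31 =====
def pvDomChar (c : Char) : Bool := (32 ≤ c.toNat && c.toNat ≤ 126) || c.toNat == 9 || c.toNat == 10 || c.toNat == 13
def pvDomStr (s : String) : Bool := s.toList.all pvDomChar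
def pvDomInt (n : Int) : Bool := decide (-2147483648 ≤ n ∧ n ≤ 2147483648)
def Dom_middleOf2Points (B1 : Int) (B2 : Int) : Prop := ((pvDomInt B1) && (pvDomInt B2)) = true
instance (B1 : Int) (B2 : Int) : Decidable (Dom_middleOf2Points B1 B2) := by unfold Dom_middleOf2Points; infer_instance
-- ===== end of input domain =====

-- B replaces A's four min/max branch loops by one alignment check, an endpoint
-- normalization and a single parametrized march (objective: simpler decomposition).

-- ===== PORT A =====
def pos2xy (p : Int) : Int × Int :=
  (PySem.Int.mod (p - 1) 4 + 1, PySem.Int.floordiv (p - 1) 4 + 1)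

def xy2pos (x y : Int) : Int := x + 4 * (y - 1)

def middleOf2Points (B1 : Int) (B2 : Int) : List Int :=
  let x1 := (pos2xy B1).1
  let y1 := (pos2xy B1).2
  let x2 := (pos2xy B2).1
  let y2 := (pos2xy B2).2
  let points : List Int := []
  if x1 = x2 then
    let sy := min y2 y1
    let ey := max y2 y1
    (PySem.List.pyRange sy (ey + 1) 1).foldl (fun acc y => acc ++ [xy2pos x1 y]) points
  else if y1 = y2 then
    let sx := min x2 x1
    let ex := max x2 x1
    (PySem.List.pyRange sx (ex + 1) 1).foldl (fun acc x => acc ++ [xy2pos x y1]) points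
  else if x1 - y1 = x2 - y2 then
    let a := x1 - y1
    let sx := min x2 x1
    let ex := max x2 x1
    (PySem.List.pyRange sx (ex + 1) 1).foldl (fun acc x => acc ++ [xy2pos x (x - a)]) points
  else if x1 + y1 = x2 + y2 then
    let a := x1 + y1
    let sx := min x2 x1
    let ex := max x2 x1
    (PySem.List.pyRange sx (ex + 1) 1).foldl (fun acc x => acc ++ [xy2pos x (a - x)]) points
  else points

-- ===== PORT B =====
-- the single marching loop of Source B's final comprehension
def middleOf2Points_march (x1 y1 x2 y2 : Int) : List Int :=
  let dx : Int := (if x1 < x2 then 1 else 0) - (if x2 < x1 then 1 else 0)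
  let dy : Int := (if y1 < y2 then 1 else 0) - (if y2 < y1 then 1 else 0)
  let n : Int := max |x2 - x1| |y2 - y1|
  (PySem.List.pyRange 0 (n + 1) 1).map (fun i => (x1 + i * dx) + 4 * ((y1 + i * dy) - 1))

def middleOf2Points_alt (B1 : Int) (B2 : Int) : List Int :=
  let x1 := PySem.Int.mod (B1 - 1) 4 + 1
  let y1 := PySem.Int.floordiv (B1 - 1) 4 + 1
  let x2 := PySem.Int.mod (B2 - 1) 4 + 1
  let y2 := PySem.Int.floordiv (B2 - 1) 4 + 1
  if x1 = x2 ∨ y1 = y2 ∨ x1 - y1 = x2 - y2 ∨ x1 + y1 = x2 + y2 then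
    if (x1 = x2 ∧ y2 < y1) ∨ (¬ x1 = x2 ∧ x2 < x1) then
      middleOf2Points_march x2 y2 x1 y1
    else
      middleOf2Points_march x1 y1 x2 y2
  else []

-- ===== PRECONDITION & SPEC =====
def Spec_middleOf2Points (B1 : Int) (B2 : Int) (out : List Int) : Prop := out = middleOf2Points_alt B1 B2
instance (B1 : Int) (B2 : Int) (out : List Int) : Decidable (Spec_middleOf2Points B1 B2 out) := by unfold Spec_middleOf2Points; infer_instance

-- ===== CLAIM (what is proved, stated in full; the proofs are below) =====
def Claim_equal_middleOf2Points : Prop := ∀ (B1 : Int) (B2 : Int), Dom_middleOf2Points B1 B2 → Spec_middleOf2Points B1 B2 (middleOf2Points B1 B2)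

-- ===== LEMMAS AND PROOFS =====


-- reindex a map over an arbitrary unit-step range to a map over a 0-based range
lemma map_pyRange_shift (a b : Int) (f : Int → Int) :
    (PySem.List.pyRange a b 1).map f
      = (PySem.List.pyRange 0 (b - a) 1).map (fun i => f (a + i)) := by
  rw [PySem.List.pyRange_one, PySem.List.pyRange_one]
  simp [List.map_map, Function.comp]

-- unfold the march at given direction/length values
lemma march_spec (a b c d dx dy n : Int)
    (hdx : (if a < c then (1 : Int) else 0) - (if c < a then 1 else 0) = dx)
    (hdy : (if b < d then (1 : Int) else 0) - (if d < b then 1 else 0) = dy)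
    (hn : max |c - a| |d - b| = n) :
    middleOf2Points_march a b c d
      = (PySem.List.pyRange 0 (n + 1) 1).map
          (fun i => (a + i * dx) + 4 * ((b + i * dy) - 1)) := by
  simp only [middleOf2Points_march, hdx, hdy, hn]

-- two maps over matching ranges agree when the functions agree under the shift
lemma map_match (s e : Int) (f g : Int → Int) (h : ∀ i, f (s + i) = g i) :
    (PySem.List.pyRange s (e + 1) 1).map f
      = (PySem.List.pyRange 0 ((e - s) + 1) 1).map g := by
  rw [map_pyRange_shift, show e + 1 - s = (e - s) + 1 by ring]
  simp only [h]

-- the core equivalence on the decoded coordinates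
lemma core_eq (x1 y1 x2 y2 : Int) :
    (if x1 = x2 then
      (PySem.List.pyRange (min y2 y1) (max y2 y1 + 1) 1).foldl
        (fun acc y => acc ++ [xy2pos x1 y]) ([] : List Int)
    else if y1 = y2 then
      (PySem.List.pyRange (min x2 x1) (max x2 x1 + 1) 1).foldl
        (fun acc x => acc ++ [xy2pos x y1]) ([] : List Int)
    else if x1 - y1 = x2 - y2 then
      (PySem.List.pyRange (min x2 x1) (max x2 x1 + 1) 1).foldl
        (fun acc x => acc ++ [xy2pos x (x - (x1 - y1))]) ([] : List Int)
    else if x1 + y1 = x2 + y2 then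
      (PySem.List.pyRange (min x2 x1) (max x2 x1 + 1) 1).foldl
        (fun acc x => acc ++ [xy2pos x ((x1 + y1) - x)]) ([] : List Int)
    else ([] : List Int))
    =
    (if x1 = x2 ∨ y1 = y2 ∨ x1 - y1 = x2 - y2 ∨ x1 + y1 = x2 + y2 then
      if (x1 = x2 ∧ y2 < y1) ∨ (¬ x1 = x2 ∧ x2 < x1) then
        middleOf2Points_march x2 y2 x1 y1
      else
        middleOf2Points_march x1 y1 x2 y2
    else []) := by
  by_cases h1 : x1 = x2
  · subst h1
    rw [if_pos rfl, if_pos (Or.inl rfl)]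
    rcases lt_trichotomy y1 y2 with h | h | h
    · rw [if_neg (by omega), PySem.List.foldl_append_singleton_eq_map, List.nil_append,
          show min y2 y1 = y1 by omega, show max y2 y1 = y2 by omega,
          march_spec x1 y1 x1 y2 0 1 (y2 - y1) (by split_ifs <;> omega) (by split_ifs <;> omega)
            (by rw [abs_of_nonneg (by omega : (0:Int) ≤ x1 - x1),
                    abs_of_nonneg (by omega : (0:Int) ≤ y2 - y1)]; omega)]
      exact map_match y1 y2 _ _ (fun i => by simp [xy2pos]; try ring)
    · subst h
      rw [if_neg (by omega), PySem.List.foldl_append_singleton_eq_map, List.nil_append,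
          min_self, max_self, PySem.List.pyRange_one_singleton,
          march_spec x1 y1 x1 y1 0 0 0 (by split_ifs <;> omega) (by split_ifs <;> omega)
            (by rw [abs_of_nonneg (by omega : (0:Int) ≤ x1 - x1),
                    abs_of_nonneg (by omega : (0:Int) ≤ y1 - y1)]; omega),
          PySem.List.pyRange_one_singleton]
      simp [xy2pos]
    · rw [if_pos (Or.inl ⟨rfl, h⟩), PySem.List.foldl_append_singleton_eq_map, List.nil_append,
          show min y2 y1 = y2 by omega, show max y2 y1 = y1 by omega,
          march_spec x1 y2 x1 y1 0 1 (y1 - y2) (by split_ifs <;> omega) (by split_ifs <;> omega)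
            (by rw [abs_of_nonneg (by omega : (0:Int) ≤ x1 - x1),
                    abs_of_nonneg (by omega : (0:Int) ≤ y1 - y2)]; omega)]
      exact map_match y2 y1 _ _ (fun i => by simp [xy2pos]; try ring)
  · by_cases h2 : y1 = y2
    · subst h2
      rw [if_neg h1, if_pos rfl, if_pos (Or.inr (Or.inl rfl))]
      rcases lt_or_gt_of_ne (fun he => h1 he) with h | h
      · rw [if_neg (by omega), PySem.List.foldl_append_singleton_eq_map, List.nil_append,
            show min x2 x1 = x1 by omega, show max x2 x1 = x2 by omega,
            march_spec x1 y1 x2 y1 1 0 (x2 - x1) (by split_ifs <;> omega) (by split_ifs <;> omega)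
              (by rw [abs_of_nonneg (by omega : (0:Int) ≤ x2 - x1),
                      abs_of_nonneg (by omega : (0:Int) ≤ y1 - y1)]; omega)]
        exact map_match x1 x2 _ _ (fun i => by simp [xy2pos]; try ring)
      · rw [if_pos (Or.inr ⟨h1, h⟩), PySem.List.foldl_append_singleton_eq_map, List.nil_append,
            show min x2 x1 = x2 by omega, show max x2 x1 = x1 by omega,
            march_spec x2 y1 x1 y1 1 0 (x1 - x2) (by split_ifs <;> omega) (by split_ifs <;> omega)
              (by rw [abs_of_nonneg (by omega : (0:Int) ≤ x1 - x2),
                      abs_of_nonneg (by omega : (0:Int) ≤ y1 - y1)]; omega)]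
        exact map_match x2 x1 _ _ (fun i => by simp [xy2pos]; try ring)
    · by_cases h3 : x1 - y1 = x2 - y2
      · rw [if_neg h1, if_neg h2, if_pos h3, if_pos (Or.inr (Or.inr (Or.inl h3)))]
        rcases lt_or_gt_of_ne (fun he => h1 he) with h | h
        · rw [if_neg (by omega), PySem.List.foldl_append_singleton_eq_map, List.nil_append,
              show min x2 x1 = x1 by omega, show max x2 x1 = x2 by omega,
              march_spec x1 y1 x2 y2 1 1 (x2 - x1) (by split_ifs <;> omega)
                (by split_ifs <;> omega)
                (by rw [abs_of_nonneg (by omega : (0:Int) ≤ x2 - x1),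
                        abs_of_nonneg (by omega : (0:Int) ≤ y2 - y1)]; omega)]
          exact map_match x1 x2 _ _ (fun i => by simp [xy2pos]; try ring)
        · rw [if_pos (Or.inr ⟨h1, h⟩), PySem.List.foldl_append_singleton_eq_map, List.nil_append,
              show min x2 x1 = x2 by omega, show max x2 x1 = x1 by omega,
              march_spec x2 y2 x1 y1 1 1 (x1 - x2) (by split_ifs <;> omega)
                (by split_ifs <;> omega)
                (by rw [abs_of_nonneg (by omega : (0:Int) ≤ x1 - x2),
                        abs_of_nonneg (by omega : (0:Int) ≤ y1 - y2)]; omega)]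
          exact map_match x2 x1 _ _ (fun i => by simp [xy2pos]; omega)
      · by_cases h4 : x1 + y1 = x2 + y2
        · rw [if_neg h1, if_neg h2, if_neg h3, if_pos h4,
              if_pos (Or.inr (Or.inr (Or.inr h4)))]
          rcases lt_or_gt_of_ne (fun he => h1 he) with h | h
          · rw [if_neg (by omega), PySem.List.foldl_append_singleton_eq_map, List.nil_append,
                show min x2 x1 = x1 by omega, show max x2 x1 = x2 by omega,
                march_spec x1 y1 x2 y2 1 (-1) (x2 - x1) (by split_ifs <;> omega)
                  (by split_ifs <;> omega)
                  (by rw [abs_of_nonneg (by omega : (0:Int) ≤ x2 - x1),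
                          abs_of_nonpos (by omega : y2 - y1 ≤ (0:Int))]; omega)]
            exact map_match x1 x2 _ _ (fun i => by simp [xy2pos]; try ring)
          · rw [if_pos (Or.inr ⟨h1, h⟩), PySem.List.foldl_append_singleton_eq_map,
                List.nil_append,
                show min x2 x1 = x2 by omega, show max x2 x1 = x1 by omega,
                march_spec x2 y2 x1 y1 1 (-1) (x1 - x2) (by split_ifs <;> omega)
                  (by split_ifs <;> omega)
                  (by rw [abs_of_nonneg (by omega : (0:Int) ≤ x1 - x2),
                          abs_of_nonpos (by omega : y1 - y2 ≤ (0:Int))]; omega)]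
            exact map_match x2 x1 _ _ (fun i => by simp [xy2pos]; omega)
        · rw [if_neg h1, if_neg h2, if_neg h3, if_neg h4, if_neg (by tauto)]


-- ===== VERDICT (by name: the statement is the Claim_ definition above) =====
theorem middleOf2Points_spec : Claim_equal_middleOf2Points := by
  intro B1 B2 _
  unfold Spec_middleOf2Points middleOf2Points middleOf2Points_alt pos2xy
  exact core_eq _ _ _ _
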